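-- pv_equiv track=rewrite | github.com/mayelespino/code | leetcode/pdf-c01-10.py | find_no_repeat_substr
-- ===== SOURCE A (Python) =====
-- def find_no_repeat_substr(input_string):
--     sub_string = ""
--     for char in input_string:
--         sub_string += char
--         if  input_string.count(sub_string) == len(input_string):
--             break
--         elif input_string.count(sub_string) == 1:
--             break
--
--     return(sub_string)
-- ===== SOURCE B (Python) =====
-- def find_no_repeat_substr(input_string):
--     s = input_string
--     n = len(s)
--     if n == 0:
--         return ""
--     if all(c == s[0] for c in s):
--         return s[0]
--     # z[i-1] = length of the longest common prefix of s and s[i:], for i = 1..n-1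
--     z = []
--     for i in range(1, n):
--         j = 0
--         while i + j < n and s[j] == s[i + j]:
--             j += 1
--         z.append(j)
--     # smallest k such that no later occurrence of the length-k prefix starts at index >= k
--     best = n
--     suffmax = 0
--     for k in range(n - 1, 0, -1):
--         suffmax = max(suffmax, z[k - 1])
--         if suffmax < k:
--             best = k
--     return s[:best]
-- ===== Notes on version B (the rewrite author's own statement) =====
-- stated objective: faster
-- what changed: A rescans the whole string with str.count for every prefix length (O(n^3)); B computes a naive Z-array (longest common prefix of the string with each of its suffixes, O(n^2)) and finds the shortest prefix occurring exactly once (or returns the first character when all characters are equal) with a single backward suffix-maximum scan.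
import Mathlib
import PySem

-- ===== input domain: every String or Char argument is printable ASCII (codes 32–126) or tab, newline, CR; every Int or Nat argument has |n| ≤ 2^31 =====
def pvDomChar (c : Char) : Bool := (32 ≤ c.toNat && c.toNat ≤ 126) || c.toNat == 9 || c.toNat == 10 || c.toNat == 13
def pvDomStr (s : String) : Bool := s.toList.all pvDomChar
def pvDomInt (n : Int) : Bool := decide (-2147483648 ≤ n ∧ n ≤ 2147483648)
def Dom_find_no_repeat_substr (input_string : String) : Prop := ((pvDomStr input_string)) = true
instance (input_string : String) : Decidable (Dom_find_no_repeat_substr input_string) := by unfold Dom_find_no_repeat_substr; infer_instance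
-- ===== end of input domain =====

-- B replaces A's per-prefix full-string count() scans (O(n^3)) by one naive Z-array (LCP of every
-- suffix with the string, O(n^2)) plus a single backward suffix-maximum scan; measured faster.

-- ===== PORT A =====
-- the for-loop with break: sub_string accumulates, rest is what remains of the iteration
def pvLoopA (s : List Char) (sub : List Char) : List Char → List Char
  | [] => sub
  | c :: rest =>
      let sub' := sub ++ [c]
      if PySem.Chars.count s sub' = s.length then sub'
      else if PySem.Chars.count s sub' = 1 then sub'
      else pvLoopA s sub' rest

def find_no_repeat_substr (input_string : String) : String :=
  String.ofList (pvLoopA input_string.toList [] input_string.toList)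

-- ===== PORT B =====
-- the inner `while i + j < n and s[j] == s[i+j]: j += 1` loop; both indices are in range in
-- Python whenever the guard is tested, so Option-equality of getElem? is exact here
def pvZProbe (s : List Char) (i : Nat) (j : Nat) : Nat :=
  if h : i + j < s.length ∧ s[j]? = s[i + j]? then pvZProbe s i (j + 1) else j
termination_by s.length - (i + j)
decreasing_by omega

-- `for i in range(1, n): ... z.append(j)`
def pvZ (s : List Char) : List Int :=
  (PySem.List.pyRange 1 (s.length : Int) 1).foldl
    (fun z i => z ++ [(pvZProbe s i.toNat 0 : Int)]) []

-- `best = n; suffmax = 0; for k in range(n-1, 0, -1): ...`; z[k-1] is in range in Python,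
-- so pyGetD with default 0 is exact
def pvBack (z : List Int) (n : Nat) : Int :=
  ((PySem.List.pyRange ((n : Int) - 1) 0 (-1)).foldl
    (fun (st : Int × Int) k =>
      let suffmax := max st.2 (PySem.List.pyGetD z (k - 1) 0)
      ((if suffmax < k then k else st.1), suffmax))
    ((n : Int), 0)).1

def find_no_repeat_substr_alt (input_string : String) : String :=
  let s := input_string.toList
  let n := s.length
  if n = 0 then ""
  else
    let c0 := s.headI            -- s[0]; n ≠ 0 here, so the index is in range
    if s.all (fun c => c == c0) then String.ofList [c0]
    else String.ofList (PySem.List.slice s none (some (pvBack (pvZ s) n)))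

-- ===== PRECONDITION & SPEC =====
def Spec_find_no_repeat_substr (input_string : String) (out : String) : Prop := out = find_no_repeat_substr_alt input_string
instance (input_string : String) (out : String) : Decidable (Spec_find_no_repeat_substr input_string out) := by unfold Spec_find_no_repeat_substr; infer_instance

-- ===== CLAIM (what is proved, stated in full; the proofs are below) =====
def Claim_equal_find_no_repeat_substr : Prop := ∀ (input_string : String), Dom_find_no_repeat_substr input_string → Spec_find_no_repeat_substr input_string (find_no_repeat_substr input_string)

-- ===== LEMMAS AND PROOFS =====

-- ---- facts about PySem.Chars.count (A's primitive) ----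

lemma pv_go_succ_cons (sub : List Char) (fuel acc : Nat) (c : Char) (t : List Char) :
    PySem.Chars.count.go sub (fuel + 1) (c :: t) acc =
      if sub.isPrefixOf (c :: t) then
        PySem.Chars.count.go sub fuel ((c :: t).drop sub.length) (acc + 1)
      else PySem.Chars.count.go sub fuel t acc := rfl

lemma pv_go_acc (sub : List Char) :
    ∀ (fuel : Nat) (l : List Char) (acc : Nat),
      PySem.Chars.count.go sub fuel l acc = acc + PySem.Chars.count.go sub fuel l 0 := by
  intro fuel
  induction fuel with
  | zero => intro l acc; rfl
  | succ f ih =>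
    intro l acc
    cases l with
    | nil => rfl
    | cons c t =>
      rw [pv_go_succ_cons, pv_go_succ_cons]
      split_ifs with h
      · rw [ih _ (acc + 1), ih _ (0 + 1)]; omega
      · rw [ih t acc]

lemma pv_go_fuel (sub : List Char) (hsub : sub ≠ []) :
    ∀ (fuel : Nat) (l : List Char) (acc : Nat), l.length ≤ fuel →
      PySem.Chars.count.go sub fuel l acc = PySem.Chars.count.go sub l.length l acc := by
  intro fuel
  induction fuel using Nat.strong_induction_on with
  | _ fuel ih =>
    intro l acc hl
    cases fuel with
    | zero =>
      cases l with
      | nil => rfl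
      | cons c t => simp at hl
    | succ f =>
      cases l with
      | nil => rfl
      | cons c t =>
        have hsl : 1 ≤ sub.length := by
          cases sub with
          | nil => exact absurd rfl hsub
          | cons a b => simp
        have hl' : t.length + 1 ≤ f + 1 := by simpa using hl
        have hdl : ((c :: t).drop sub.length).length ≤ t.length := by
          rw [List.length_drop]; simp only [List.length_cons]; omega
        rw [pv_go_succ_cons, show (c :: t).length = t.length + 1 from rfl, pv_go_succ_cons]
        split_ifs with h
        · rw [ih f (by omega) _ _ (by omega)]
          rw [ih t.length (by omega) _ _ hdl]
        · rw [ih f (by omega) t acc (by omega)]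

lemma pv_count_unfold (sub : List Char) (hsub : sub ≠ []) (l : List Char) :
    PySem.Chars.count l sub = PySem.Chars.count.go sub l.length l 0 := by
  simp [PySem.Chars.count, List.isEmpty_iff, hsub]

lemma pv_count_nil (sub : List Char) (hsub : sub ≠ []) :
    PySem.Chars.count [] sub = 0 := by
  rw [pv_count_unfold sub hsub]; rfl

lemma pv_count_cons (sub : List Char) (hsub : sub ≠ []) (c : Char) (t : List Char) :
    PySem.Chars.count (c :: t) sub =
      if sub.isPrefixOf (c :: t) then PySem.Chars.count ((c :: t).drop sub.length) sub + 1
      else PySem.Chars.count t sub := by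
  have hsl : 1 ≤ sub.length := by
    cases sub with
    | nil => exact absurd rfl hsub
    | cons a b => simp
  rw [pv_count_unfold sub hsub, show (c :: t).length = t.length + 1 from rfl, pv_go_succ_cons]
  split_ifs with h
  · have hlen : ((c :: t).drop sub.length).length ≤ t.length := by
      rw [List.length_drop]; simp only [List.length_cons]; omega
    rw [pv_go_acc, pv_go_fuel sub hsub _ _ _ hlen, pv_count_unfold sub hsub]
    omega
  · rw [pv_count_unfold sub hsub]

lemma pv_count_zero_iff (sub : List Char) (hsub : sub ≠ []) :
    ∀ (l : List Char), PySem.Chars.count l sub = 0 ↔ ¬ sub <:+: l := by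
  suffices H : ∀ (m : Nat) (l : List Char), l.length ≤ m →
      (PySem.Chars.count l sub = 0 ↔ ¬ sub <:+: l) by
    exact fun l => H l.length l le_rfl
  intro m
  induction m with
  | zero =>
    intro l hl
    have : l = [] := by cases l <;> simp_all
    subst this
    simp [pv_count_nil sub hsub, List.infix_nil]
    exact fun h => hsub h
  | succ n ih =>
    intro l hl
    cases l with
    | nil =>
      simp [pv_count_nil sub hsub, List.infix_nil]
      exact fun h => hsub h
    | cons c t =>
      rw [pv_count_cons sub hsub]
      split_ifs with hp
      · have hpre : sub <+: (c :: t) := List.isPrefixOf_iff_prefix.mp hp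
        simp [List.infix_cons_iff, hpre]
      · have hnp : ¬ sub <+: (c :: t) := fun h => hp (List.isPrefixOf_iff_prefix.mpr h)
        rw [ih t (by simp at hl; omega)]
        simp [List.infix_cons_iff, hnp]

lemma pv_count_prefix (sub : List Char) (hsub : sub ≠ []) (l : List Char) (hp : sub <+: l) :
    PySem.Chars.count l sub = PySem.Chars.count (l.drop sub.length) sub + 1 := by
  cases l with
  | nil =>
    exfalso; exact hsub (List.prefix_nil.mp hp)
  | cons c t =>
    rw [pv_count_cons sub hsub]
    rw [if_pos (List.isPrefixOf_iff_prefix.mpr hp)]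

lemma pv_count_singleton (c : Char) (l : List Char) :
    PySem.Chars.count l [c] = l.count c := by
  induction l with
  | nil => rw [pv_count_nil _ (by simp)]; rfl
  | cons a t ih =>
    rw [pv_count_cons _ (by simp)]
    have hpre : [c].isPrefixOf (a :: t) = (c == a) := by
      simp [List.isPrefixOf]
    rw [hpre]
    by_cases hca : c = a
    · subst hca
      simp [List.count_cons, ih]
    · have : (c == a) = false := by simp [hca]
      rw [this]
      simp [List.count_cons, ih, Ne.symm hca]

lemma pv_count_mul_le (sub : List Char) (hsub : sub ≠ []) :
    ∀ (l : List Char), sub.length * PySem.Chars.count l sub ≤ l.length := by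
  suffices H : ∀ (m : Nat) (l : List Char), l.length ≤ m →
      sub.length * PySem.Chars.count l sub ≤ l.length by
    exact fun l => H l.length l le_rfl
  intro m
  induction m with
  | zero =>
    intro l hl
    have : l = [] := by cases l <;> simp_all
    subst this
    simp [pv_count_nil sub hsub]
  | succ n ih =>
    intro l hl
    cases l with
    | nil => simp [pv_count_nil sub hsub]
    | cons c t =>
      have hsl : 1 ≤ sub.length := by
        cases sub with
        | nil => exact absurd rfl hsub
        | cons a b => simp
      rw [pv_count_cons sub hsub]
      split_ifs with hp
      · have hple : sub.length ≤ (c :: t).length :=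
          (List.isPrefixOf_iff_prefix.mp hp).length_le
        have hdl : ((c :: t).drop sub.length).length = (c :: t).length - sub.length := by
          rw [List.length_drop]
        have hrec := ih ((c :: t).drop sub.length)
          (by rw [hdl]; simp only [List.length_cons] at *; omega)
        rw [Nat.mul_add, Nat.mul_one]
        simp only [List.length_cons] at *
        omega
      · have hrec := ih t (by simp at hl; omega)
        simp only [List.length_cons]
        omega

lemma pv_count_self (s : List Char) (hs : s ≠ []) : PySem.Chars.count s s = 1 := by
  rw [pv_count_prefix s hs s List.prefix_rfl, List.drop_length, pv_count_nil s hs]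

-- ---- A's loop: it stops at the first prefix length k with pvPB ----

def pvPB (s : List Char) (k : Nat) : Bool :=
  (PySem.Chars.count s (s.take k) == s.length) || (PySem.Chars.count s (s.take k) == 1)

lemma pv_pvPB_large (s : List Char) (hs : s ≠ []) (k : Nat) (hk : s.length ≤ k) :
    pvPB s k = true := by
  simp [pvPB, List.take_of_length_le hk, pv_count_self s hs]

lemma pv_exP (s : List Char) (hs : s ≠ []) (j : Nat) : ∃ k, j < k ∧ pvPB s k = true :=
  ⟨j + s.length + 1, by omega, pv_pvPB_large s hs _ (by omega)⟩

lemma pv_loopA_spec (s : List Char) (hs : s ≠ []) :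
    ∀ (j : Nat), j ≤ s.length →
      pvLoopA s (s.take j) (s.drop j) = s.take (Nat.find (pv_exP s hs j)) := by
  suffices H : ∀ (m : Nat) (j : Nat), j ≤ s.length → s.length - j ≤ m →
      pvLoopA s (s.take j) (s.drop j) = s.take (Nat.find (pv_exP s hs j)) by
    exact fun j hj => H (s.length - j) j hj le_rfl
  intro m
  induction m with
  | zero =>
    intro j hj hm
    have hjn : j = s.length := by omega
    subst hjn
    rw [List.drop_length, List.take_of_length_le le_rfl]
    have hfind : s.length < Nat.find (pv_exP s hs s.length) :=
      (Nat.find_spec (pv_exP s hs s.length)).1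
    rw [List.take_of_length_le (by omega)]
    simp [pvLoopA]
  | succ m ih =>
    intro j hj hm
    by_cases hjn : j < s.length
    case neg =>
      have hjn' : j = s.length := by omega
      subst hjn'
      rw [List.drop_length, List.take_of_length_le le_rfl]
      have hfind : s.length < Nat.find (pv_exP s hs s.length) :=
        (Nat.find_spec (pv_exP s hs s.length)).1
      rw [List.take_of_length_le (by omega)]
      simp [pvLoopA]
    case pos =>
      rw [List.drop_eq_getElem_cons hjn]
      have hsub' : s.take j ++ [s[j]] = s.take (j + 1) := by
        rw [List.take_add_one, List.getElem?_eq_getElem hjn]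
        rfl
      simp only [pvLoopA, hsub']
      by_cases hP : pvPB s (j + 1) = true
      case pos =>
        have hfind : Nat.find (pv_exP s hs j) = j + 1 := by
          rw [Nat.find_eq_iff]
          exact ⟨⟨by omega, hP⟩, fun k hk hc => absurd hc.1 (by omega)⟩
        rw [hfind]
        have hP' := hP
        simp only [pvPB, Bool.or_eq_true, beq_iff_eq] at hP'
        rcases hP' with h | h
        · rw [if_pos h]
        · by_cases hN : PySem.Chars.count s (s.take (j + 1)) = s.length
          · rw [if_pos hN]
          · rw [if_neg hN, if_pos h]
      case neg =>
        have hP' : ¬ (PySem.Chars.count s (s.take (j + 1)) = s.length ∨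
            PySem.Chars.count s (s.take (j + 1)) = 1) := by
          simp only [pvPB, Bool.or_eq_true, beq_iff_eq] at hP; exact hP
        obtain ⟨h1, h2⟩ := not_or.mp hP'
        rw [if_neg h1, if_neg h2]
        rw [ih (j + 1) (by omega) (by omega)]
        congr 1
        have hPB : pvPB s (j + 1) = false := by
          simp only [pvPB, Bool.or_eq_true, beq_iff_eq]
          simp [h1, h2]
        have hle1 : Nat.find (pv_exP s hs j) ≤ Nat.find (pv_exP s hs (j + 1)) := by
          apply Nat.find_min'
          have ha := (Nat.find_spec (pv_exP s hs (j + 1))).1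
          exact ⟨by omega, (Nat.find_spec (pv_exP s hs (j + 1))).2⟩
        have hle2 : Nat.find (pv_exP s hs (j + 1)) ≤ Nat.find (pv_exP s hs j) := by
          apply Nat.find_min'
          have ha := (Nat.find_spec (pv_exP s hs j)).1
          have hb := (Nat.find_spec (pv_exP s hs j)).2
          refine ⟨?_, hb⟩
          rcases Nat.lt_or_ge (j + 1) (Nat.find (pv_exP s hs j)) with hlt | hge
          · exact hlt
          · exfalso
            have heq : Nat.find (pv_exP s hs j) = j + 1 := by omega
            rw [heq] at hb
            rw [hPB] at hb
            exact absurd hb (by decide)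
        omega

-- ---- lcp and the Z-probe ----

def pvLcp : List Char → List Char → Nat
  | a :: as, b :: bs => if a = b then pvLcp as bs + 1 else 0
  | _, _ => 0

lemma pv_lcp_nil_right (xs : List Char) : pvLcp xs [] = 0 := by
  cases xs <;> rfl

lemma pv_lcp_prefix_iff : ∀ (xs ys : List Char) (k : Nat), k ≤ xs.length →
    (xs.take k <+: ys ↔ k ≤ pvLcp xs ys) := by
  intro xs
  induction xs with
  | nil =>
    intro ys k hk
    simp at hk
    subst hk
    simp
  | cons a as ih =>
    intro ys k hk
    cases k with
    | zero => simp
    | succ k =>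
      cases ys with
      | nil =>
        rw [pv_lcp_nil_right]
        simp [List.take_succ_cons, List.prefix_nil]
      | cons b bs =>
        rw [List.take_succ_cons, List.cons_prefix_cons]
        by_cases hab : a = b
        · subst hab
          have hl : pvLcp (a :: as) (a :: bs) = pvLcp as bs + 1 := by simp [pvLcp]
          rw [hl]
          have hk' : k ≤ as.length := by simp at hk; omega
          constructor
          · rintro ⟨-, h⟩
            have := (ih bs k hk').mp h
            omega
          · intro h
            exact ⟨rfl, (ih bs k hk').mpr (by omega)⟩
        · have hl : pvLcp (a :: as) (b :: bs) = 0 := by simp [pvLcp, hab]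
          rw [hl]
          constructor
          · rintro ⟨h, -⟩
            exact absurd h hab
          · omega

lemma pv_zProbe_eq (s : List Char) (i : Nat) (hi : 1 ≤ i) :
    ∀ (j : Nat), pvZProbe s i j = j + pvLcp (s.drop j) (s.drop (i + j)) := by
  suffices H : ∀ (m : Nat) (j : Nat), s.length - (i + j) ≤ m →
      pvZProbe s i j = j + pvLcp (s.drop j) (s.drop (i + j)) by
    exact fun j => H (s.length - (i + j)) j le_rfl
  intro m
  induction m with
  | zero =>
    intro j hm
    have hlen : s.length ≤ i + j := by omega
    rw [pvZProbe, dif_neg (by rintro ⟨h, -⟩; omega)]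
    rw [show s.drop (i + j) = [] from List.drop_eq_nil_of_le hlen, pv_lcp_nil_right]
    omega
  | succ m ih =>
    intro j hm
    rw [pvZProbe]
    split_ifs with hg
    · obtain ⟨hlt, heq⟩ := hg
      have hj : j < s.length := by omega
      have hij : i + j < s.length := hlt
      rw [ih (j + 1) (by omega)]
      rw [List.drop_eq_getElem_cons hj, List.drop_eq_getElem_cons hij]
      have hchar : s[j] = s[i + j] := by
        have h1 : s[j]? = some s[j] := List.getElem?_eq_getElem hj
        have h2 : s[i + j]? = some s[i + j] := List.getElem?_eq_getElem hij
        rw [h1, h2] at heq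
        exact Option.some.inj heq
      simp only [pvLcp, if_pos hchar]
      rw [show i + (j + 1) = i + j + 1 from by omega]
      omega
    · rw [not_and_or] at hg
      by_cases hij : i + j < s.length
      · have hne : s[j]? ≠ s[i + j]? := by
          rcases hg with h | h
          · exact absurd hij h
          · exact h
        have hj : j < s.length := by omega
        rw [List.drop_eq_getElem_cons hj, List.drop_eq_getElem_cons hij]
        have hchar : s[j] ≠ s[i + j] := by
          intro h
          apply hne
          rw [List.getElem?_eq_getElem hj, List.getElem?_eq_getElem hij, h]
        simp only [pvLcp, if_neg hchar]
        omega
      · rw [show s.drop (i + j) = [] from List.drop_eq_nil_of_le (by omega), pv_lcp_nil_right]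
        omega

lemma pv_pyRange_asc (b : Nat) :
    PySem.List.pyRange 1 (b : Int) 1 =
      List.map (fun (i : Nat) => (i : Int)) (List.range' 1 (b - 1)) := by
  simp only [PySem.List.pyRange]
  rw [if_neg (by norm_num : ¬(1 : Int) = 0)]
  rw [if_pos (by norm_num : (0 : Int) < 1)]
  by_cases hb : (1 : Int) < (b : Int)
  · rw [if_pos hb]
    have hcount : (((b : Int) - 1 + 1 - 1) / 1).toNat = b - 1 := by
      rw [Int.ediv_one]; omega
    rw [hcount, List.range'_eq_map_range, List.map_map]
    apply List.map_congr_left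
    intro k hk
    simp only [Function.comp_apply]
    push_cast
    ring
  · rw [if_neg hb]
    rw [show b - 1 = 0 from by omega]
    simp

lemma pv_range'_reverse (m : Nat) :
    (List.range' 1 m).reverse = (List.range m).map (fun k => m - k) := by
  induction m with
  | zero => rfl
  | succ n ih =>
    rw [List.range'_concat, List.reverse_append, List.range_succ_eq_map]
    simp only [List.reverse_cons, List.reverse_nil, List.nil_append, List.map_cons,
      List.map_map, List.singleton_append]
    congr 1
    · omega
    · rw [ih]
      apply List.map_congr_left
      intro k hk
      simp only [Function.comp]
      omega

lemma pv_pyRange_desc (n : Nat) :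
    PySem.List.pyRange ((n : Int) - 1) 0 (-1) =
      List.map (fun (i : Nat) => (i : Int)) ((List.range' 1 (n - 1)).reverse) := by
  simp only [PySem.List.pyRange]
  rw [if_neg (by norm_num : ¬(-1 : Int) = 0)]
  rw [if_neg (by norm_num : ¬(0 : Int) < -1)]
  by_cases hn : (0 : Int) < (n : Int) - 1
  · rw [if_pos hn]
    have hcount : (((n : Int) - 1 - 0 + - -1 - 1) / - -1).toNat = n - 1 := by
      norm_num
    rw [hcount, pv_range'_reverse, List.map_map]
    apply List.map_congr_left
    intro k hk
    have hk' := List.mem_range.mp hk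
    simp only [Function.comp_apply]
    omega
  · rw [if_neg hn]
    rw [show n - 1 = 0 from by omega]
    simp

lemma pv_z_eq (s : List Char) :
    pvZ s = List.map (fun (i : Nat) => (pvLcp s (s.drop i) : Int)) (List.range' 1 (s.length - 1)) := by
  rw [pvZ, PySem.List.foldl_append_singleton_eq_map, List.nil_append,
    pv_pyRange_asc s.length, List.map_map]
  apply List.map_congr_left
  intro k hk
  have h1 : 1 ≤ k := by
    obtain ⟨d, hd, rfl⟩ := List.mem_range'.mp hk
    omega
  simp only [Function.comp_apply, Int.toNat_natCast]
  rw [pv_zProbe_eq s k h1 0]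
  simp

-- ---- suffix maxima of the Z-values, and the least valid prefix length ----

def pvZValidB (s : List Char) (k : Nat) : Bool :=
  decide (∀ i, i < s.length → k ≤ i → pvLcp s (s.drop i) < k)

def pvMaxZ (s : List Char) (t : Nat) : Nat :=
  ((List.range' t (s.length - t)).map (fun i => pvLcp s (s.drop i))).foldr max 0

def pvMinValid (s : List Char) (t : Nat) : Nat :=
  if t < s.length then (if pvZValidB s t then t else pvMinValid s (t + 1)) else s.length
termination_by s.length - t
decreasing_by omega

lemma pv_maxZ_stop (s : List Char) (t : Nat) (ht : s.length ≤ t) : pvMaxZ s t = 0 := by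
  simp [pvMaxZ, Nat.sub_eq_zero_of_le ht]

lemma pv_maxZ_step (s : List Char) (t : Nat) (ht : t < s.length) :
    pvMaxZ s t = max (pvLcp s (s.drop t)) (pvMaxZ s (t + 1)) := by
  have h1 : s.length - t = (s.length - (t + 1)) + 1 := by omega
  rw [pvMaxZ, h1, List.range'_succ]
  rfl

lemma pv_foldr_max_lt (l : List Nat) (k : Nat) (hk : 0 < k) :
    l.foldr max 0 < k ↔ ∀ x ∈ l, x < k := by
  induction l with
  | nil => simpa using hk
  | cons a t ih => simp [Nat.max_lt, ih]

lemma pv_zvalid_iff_maxZ (s : List Char) (k : Nat) (hk : 1 ≤ k) :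
    pvZValidB s k = true ↔ pvMaxZ s k < k := by
  rw [pvZValidB, pvMaxZ, pv_foldr_max_lt _ _ (by omega), decide_eq_true_iff]
  constructor
  · intro h x hx
    simp only [List.mem_map] at hx
    obtain ⟨i, hi, rfl⟩ := hx
    obtain ⟨d, hd, rfl⟩ := List.mem_range'.mp hi
    exact h _ (by omega) (by omega)
  · intro h i hi hki
    exact h _ (List.mem_map.mpr ⟨i, List.mem_range'.mpr ⟨i - k, by omega, by omega⟩, rfl⟩)

lemma pv_zvalid_len (s : List Char) : pvZValidB s s.length = true := by
  simp only [pvZValidB, decide_eq_true_iff]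
  intro i hi hni
  omega

lemma pv_minValid_ge (s : List Char) (t : Nat) (ht : t ≤ s.length) : t ≤ pvMinValid s t := by
  suffices H : ∀ (m : Nat) (t : Nat), t ≤ s.length → s.length - t ≤ m → t ≤ pvMinValid s t by
    exact H (s.length - t) t ht le_rfl
  intro m
  induction m with
  | zero =>
    intro t ht hm
    rw [pvMinValid, if_neg (by omega)]
    omega
  | succ m ih =>
    intro t ht hm
    rw [pvMinValid]
    split_ifs with h1 h2
    · exact le_rfl
    · exact le_trans (by omega) (ih (t + 1) (by omega) (by omega))
    · omega

lemma pv_minValid_le (s : List Char) (t : Nat) : pvMinValid s t ≤ s.length := by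
  suffices H : ∀ (m : Nat) (t : Nat), s.length - t ≤ m → pvMinValid s t ≤ s.length by
    exact H (s.length - t) t le_rfl
  intro m
  induction m with
  | zero =>
    intro t hm
    rw [pvMinValid]
    split_ifs with h1 h2
    · omega
    · omega
    · exact le_rfl
  | succ m ih =>
    intro t hm
    rw [pvMinValid]
    split_ifs with h1 h2
    · omega
    · exact ih (t + 1) (by omega)
    · exact le_rfl

lemma pv_minValid_valid (s : List Char) (t : Nat) :
    pvZValidB s (pvMinValid s t) = true := by
  suffices H : ∀ (m : Nat) (t : Nat), s.length - t ≤ m → pvZValidB s (pvMinValid s t) = true by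
    exact H (s.length - t) t le_rfl
  intro m
  induction m with
  | zero =>
    intro t hm
    rw [pvMinValid]
    split_ifs with h1 h2
    · exact h2
    · omega
    · exact pv_zvalid_len s
  | succ m ih =>
    intro t hm
    rw [pvMinValid]
    split_ifs with h1 h2
    · exact h2
    · exact ih (t + 1) (by omega)
    · exact pv_zvalid_len s

lemma pv_minValid_min (s : List Char) (t : Nat) :
    ∀ k, t ≤ k → k < pvMinValid s t → pvZValidB s k = false := by
  suffices H : ∀ (m : Nat) (t : Nat), s.length - t ≤ m →
      ∀ k, t ≤ k → k < pvMinValid s t → pvZValidB s k = false by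
    exact H (s.length - t) t le_rfl
  intro m
  induction m with
  | zero =>
    intro t hm k hk1 hk2
    rw [pvMinValid] at hk2
    split_ifs at hk2 with h1 h2
    · omega
    · omega
    · omega
  | succ m ih =>
    intro t hm k hk1 hk2
    rw [pvMinValid] at hk2
    split_ifs at hk2 with h1 h2
    · omega
    · by_cases hkt : k = t
      · subst hkt
        simpa using h2
      · exact ih (t + 1) (by omega) k (by omega) hk2
    · omega

-- ---- the backward scan computes pvMinValid ----

lemma pv_z_get (s : List Char) (k : Nat) (hk1 : 1 ≤ k) (hk2 : k < s.length) :
    PySem.List.pyGetD (pvZ s) ((k : Int) - 1) 0 = (pvLcp s (s.drop k) : Int) := by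
  rw [pv_z_eq]
  rw [show ((k : Int) - 1) = ((k - 1 : Nat) : Int) from by omega]
  rw [PySem.List.pyGetD_natCast]
  have hidx : k - 1 <
      (List.map (fun (i : Nat) => (pvLcp s (s.drop i) : Int)) (List.range' 1 (s.length - 1))).length := by
    simp only [List.length_map, List.length_range']
    omega
  rw [List.getD_eq_getElem _ _ hidx, List.getElem_map, List.getElem_range',
    show 1 + 1 * (k - 1) = k from by omega]

lemma pv_back_fold (s : List Char) :
    ∀ (m t : Nat), 1 ≤ t → t + m = s.length →
      ((List.map (fun (i : Nat) => (i : Int)) ((List.range' t m).reverse)).foldl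
        (fun (st : Int × Int) k =>
          let suffmax := max st.2 (PySem.List.pyGetD (pvZ s) (k - 1) 0)
          ((if suffmax < k then k else st.1), suffmax))
        ((s.length : Int), 0)) = ((pvMinValid s t : Int), (pvMaxZ s t : Int)) := by
  intro m
  induction m with
  | zero =>
    intro t ht1 ht2
    simp only [List.range'_zero, List.reverse_nil, List.map_nil, List.foldl_nil]
    rw [pvMinValid, if_neg (by omega), pv_maxZ_stop s t (by omega)]
    simp

  | succ m ih =>
    intro t ht1 ht2
    have htn : t < s.length := by omega
    rw [List.range'_succ, List.reverse_cons, List.map_append, List.foldl_append,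
      ih (t + 1) (by omega) (by omega)]
    simp only [List.map_cons, List.map_nil, List.foldl_cons, List.foldl_nil]
    rw [pv_z_get s t ht1 htn]
    have hmax : max ((pvMaxZ s (t + 1) : Nat) : Int) ((pvLcp s (s.drop t) : Nat) : Int)
        = ((pvMaxZ s t : Nat) : Int) := by
      rw [pv_maxZ_step s t htn, Nat.cast_max]
      exact max_comm _ _
    rw [hmax]
    have hmv : pvMinValid s t = if pvZValidB s t then t else pvMinValid s (t + 1) := by
      rw [pvMinValid, if_pos htn]
    by_cases hv : pvZValidB s t = true
    · have hlt : ((pvMaxZ s t : Nat) : Int) < (t : Int) := by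
        exact_mod_cast (pv_zvalid_iff_maxZ s t ht1).mp hv
      rw [if_pos hlt, hmv, if_pos hv]
    · have hnlt : ¬ ((pvMaxZ s t : Nat) : Int) < (t : Int) := by
        intro hlt
        exact hv ((pv_zvalid_iff_maxZ s t ht1).mpr (by exact_mod_cast hlt))
      rw [if_neg hnlt, hmv, if_neg hv]

lemma pv_back_eq (s : List Char) (hs : s ≠ []) :
    pvBack (pvZ s) s.length = (pvMinValid s 1 : Int) := by
  have hn : 1 ≤ s.length := List.length_pos_of_ne_nil hs
  rw [pvBack, pv_pyRange_desc s.length, pv_back_fold s (s.length - 1) 1 le_rfl (by omega)]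

-- ---- bridging A's predicate with the Z-condition ----

lemma pv_valid_iff (s : List Char) (hs : s ≠ []) (k : Nat) (hk1 : 1 ≤ k) (hk2 : k ≤ s.length) :
    (¬ s.take k <:+: s.drop k) ↔ pvZValidB s k = true := by
  have htk : (s.take k).length = k := by
    rw [List.length_take]; omega
  have htkne : s.take k ≠ [] := by
    intro h
    have := congrArg List.length h
    rw [htk] at this
    simp at this
    omega
  rw [pvZValidB, decide_eq_true_iff]
  constructor
  · intro hninf i hi hki
    by_contra hle
    have hle' : k ≤ pvLcp s (s.drop i) := Nat.not_lt.mp hle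
    apply hninf
    rw [← PySem.Chars.isIn_iff_infix, ← PySem.Chars.exists_prefix_drop_iff_isIn]
    refine ⟨i - k, ?_⟩
    have hdd : (s.drop k).drop (i - k) = s.drop i := by
      rw [List.drop_drop]; congr 1; omega
    rw [hdd]
    exact (pv_lcp_prefix_iff s (s.drop i) k hk2).mpr hle'
  · intro hval hinf
    rw [← PySem.Chars.isIn_iff_infix, ← PySem.Chars.exists_prefix_drop_iff_isIn] at hinf
    obtain ⟨j, hj⟩ := hinf
    have hdd : (s.drop k).drop j = s.drop (k + j) := by
      rw [List.drop_drop]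
    rw [hdd] at hj
    by_cases hjk : k + j < s.length
    · have hle := (pv_lcp_prefix_iff s (s.drop (k + j)) k hk2).mp hj
      have := hval (k + j) hjk (by omega)
      omega
    · rw [List.drop_eq_nil_of_le (by omega)] at hj
      exact htkne (List.prefix_nil.mp hj)

lemma pv_pvPB_iff (s : List Char) (hs : s ≠ []) (hall : ¬ (∀ b ∈ s, s.headI = b))
    (k : Nat) (hk1 : 1 ≤ k) (hk2 : k ≤ s.length) :
    pvPB s k = true ↔ pvZValidB s k = true := by
  have hn1 : 1 ≤ s.length := List.length_pos_of_ne_nil hs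
  have htk : (s.take k).length = k := by
    rw [List.length_take]; omega
  have htkne : s.take k ≠ [] := by
    intro h
    have := congrArg List.length h
    rw [htk] at this
    simp at this
    omega
  have hnotn : PySem.Chars.count s (s.take k) ≠ s.length := by
    intro hcnt
    by_cases hk1' : k = 1
    · subst hk1'
      have hhead : s.take 1 = [s.headI] := by
        cases s with
        | nil => exact absurd rfl hs
        | cons a b => rfl
      rw [hhead, pv_count_singleton] at hcnt
      exact hall (List.count_eq_length.mp hcnt)
    · have hk2' : 2 ≤ k := by omega
      have hmul := pv_count_mul_le (s.take k) htkne s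
      rw [htk, hcnt] at hmul
      have h2 : 2 * s.length ≤ k * s.length := Nat.mul_le_mul_right s.length hk2'
      omega
  have hcount : PySem.Chars.count s (s.take k) =
      PySem.Chars.count (s.drop k) (s.take k) + 1 := by
    have := pv_count_prefix (s.take k) htkne s (List.take_prefix k s)
    rwa [htk] at this
  constructor
  · intro hP
    simp only [pvPB, Bool.or_eq_true, beq_iff_eq] at hP
    rcases hP with hP | hP
    · exact absurd hP hnotn
    · rw [hcount] at hP
      have hzero : PySem.Chars.count (s.drop k) (s.take k) = 0 := by omega
      rw [pv_count_zero_iff (s.take k) htkne] at hzero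
      exact (pv_valid_iff s hs k hk1 hk2).mp hzero
  · intro hval
    simp only [pvPB, Bool.or_eq_true, beq_iff_eq]
    right
    rw [hcount]
    have := (pv_valid_iff s hs k hk1 hk2).mpr hval
    rw [← pv_count_zero_iff (s.take k) htkne] at this
    omega

-- ===== VERDICT (by name: the statement is the Claim_ definition above) =====
theorem find_no_repeat_substr_spec : Claim_equal_find_no_repeat_substr := by
  intro str _
  unfold Spec_find_no_repeat_substr
  unfold find_no_repeat_substr find_no_repeat_substr_alt
  set l := str.toList with hl
  by_cases hnil : l = []
  · rw [hnil]
    rfl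
  · have hn : 1 ≤ l.length := List.length_pos_of_ne_nil hnil
    have hA : pvLoopA l [] l = l.take (Nat.find (pv_exP l hnil 0)) := by
      have h := pv_loopA_spec l hnil 0 (by omega)
      simpa using h
    simp only [hA]
    rw [if_neg (by omega)]
    by_cases hall : l.all (fun c => c == l.headI) = true
    · rw [if_pos hall]
      have hall' : ∀ b ∈ l, l.headI = b := by
        intro b hb
        have := List.all_eq_true.mp hall b hb
        exact (beq_iff_eq.mp this).symm
      have hP1 : pvPB l 1 = true := by
        simp only [pvPB, Bool.or_eq_true, beq_iff_eq]
        left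
        obtain ⟨a, t, hcons⟩ := List.exists_cons_of_ne_nil hnil
        have h1 : l.take 1 = [l.headI] := by rw [hcons]; rfl
        rw [h1, pv_count_singleton]
        exact List.count_eq_length.mpr hall'
      have hfind : Nat.find (pv_exP l hnil 0) = 1 := by
        rw [Nat.find_eq_iff]
        exact ⟨⟨one_pos, hP1⟩, fun k hk hc => absurd hc.1 (by omega)⟩
      rw [hfind]
      obtain ⟨a, t, hcons⟩ := List.exists_cons_of_ne_nil hnil
      rw [hcons]
      rfl
    · rw [if_neg hall]
      rw [pv_back_eq l hnil]
      rw [PySem.List.slice_to l (Int.natCast_nonneg _)]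
      rw [Int.toNat_natCast]
      have hallP : ¬ (∀ b ∈ l, l.headI = b) := by
        intro h
        apply hall
        rw [List.all_eq_true]
        intro c hc
        have := h c hc
        simp [this]
      set kA := Nat.find (pv_exP l hnil 0) with hkA
      have hspec := Nat.find_spec (pv_exP l hnil 0)
      have hkApos : 0 < kA := hspec.1
      have hkAP : pvPB l kA = true := hspec.2
      have hkAle : kA ≤ l.length :=
        Nat.find_min' _ ⟨by omega, pv_pvPB_large l hnil _ le_rfl⟩
      have hkAvalid : pvZValidB l kA = true :=
        (pv_pvPB_iff l hnil hallP kA (by omega) hkAle).mp hkAP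
      have hmv1 : 1 ≤ pvMinValid l 1 := pv_minValid_ge l 1 hn
      have hmvle : pvMinValid l 1 ≤ l.length := pv_minValid_le l 1
      have hmvP : pvPB l (pvMinValid l 1) = true :=
        (pv_pvPB_iff l hnil hallP _ hmv1 hmvle).mpr (pv_minValid_valid l 1)
      have h1 : kA ≤ pvMinValid l 1 := Nat.find_min' _ ⟨by omega, hmvP⟩
      have h2 : pvMinValid l 1 ≤ kA := by
        by_contra hcon
        have hcon' : kA < pvMinValid l 1 := by omega
        have := pv_minValid_min l 1 kA (by omega) hcon'
        rw [hkAvalid] at this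
        simp at this
      rw [show kA = pvMinValid l 1 from le_antisymm h1 h2]
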